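-- pv_equiv track=rewrite | github.com/mmzr123/ORCH-zhouhanlin | 1109-mmul-10学科+vote多图.py | vote_4
-- ===== SOURCE A (Python) =====
-- LABELS_4 = ["A", "B", "C", "D"]
--
-- def vote_4(open_ans: str, deep_ans: str, xai_ans: str) -> str:
--     import collections
--     votes = {
--         "OPENAI":   open_ans,
--         "DEEPSEEK": deep_ans,
--         "XAI":      xai_ans,
--     }
--     letters = {k: v for k, v in votes.items() if v in LABELS_4}
--     if not letters:
--         return "?"
--     counter = collections.Counter(letters.values())
--     letter, cnt = counter.most_common(1)[0]
--     if cnt >= 2: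
--         return letter
--     # 三家都不一样时按优先级
--     for name in ["OPENAI", "DEEPSEEK", "XAI"]:
--         cand = votes.get(name, "?")
--         if cand in LABELS_4:
--             return cand
--     return "?"
-- ===== SOURCE B (Python) =====
-- LABELS_4 = ["A", "B", "C", "D"]
--
-- def vote_4(open_ans: str, deep_ans: str, xai_ans: str) -> str:
--     # Pairwise-equality majority: no Counter, no dicts.
--     if open_ans in LABELS_4 and (open_ans == deep_ans or open_ans == xai_ans):
--         return open_ans
--     if deep_ans in LABELS_4 and deep_ans == xai_ans:
--         return deep_ans
--     # no valid majority pair: first valid answer in priority order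
--     for cand in (open_ans, deep_ans, xai_ans):
--         if cand in LABELS_4:
--             return cand
--     return "?"
-- ===== Notes on version B (the rewrite author's own statement) =====
-- stated objective: simpler
-- what changed: Replaces A's dict-building, filtering and collections.Counter majority extraction with direct pairwise equality tests on the three answers (guarded by label validity) plus a first-valid-in-priority-order fallback.
import Mathlib
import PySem

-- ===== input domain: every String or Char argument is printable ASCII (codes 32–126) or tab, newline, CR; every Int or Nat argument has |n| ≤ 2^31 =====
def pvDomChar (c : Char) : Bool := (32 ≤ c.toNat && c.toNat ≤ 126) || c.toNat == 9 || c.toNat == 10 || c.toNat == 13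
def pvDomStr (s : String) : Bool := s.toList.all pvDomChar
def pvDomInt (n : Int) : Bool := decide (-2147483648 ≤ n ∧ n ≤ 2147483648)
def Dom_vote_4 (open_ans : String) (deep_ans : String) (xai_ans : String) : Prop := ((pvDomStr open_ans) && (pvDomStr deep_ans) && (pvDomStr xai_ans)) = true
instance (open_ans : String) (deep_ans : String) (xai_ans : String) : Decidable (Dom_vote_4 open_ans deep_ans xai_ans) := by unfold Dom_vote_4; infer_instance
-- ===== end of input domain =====

-- B replaces A's dict/Counter machinery by direct pairwise equality tests on the three answers (objective: simpler).

-- ===== PORT A =====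
def pyLABELS_4 : List String := ["A", "B", "C", "D"]

-- exact for Counter.most_common(1)[0]: stable descending sort by count → first item of maximal count
def pvMostCommon1 (items : List (String × Int)) : String × Int :=
  match items with
  | [] => ("?", 0)   -- unreachable: A indexes [0] only on a nonempty counter
  | h :: t => t.foldl (fun best kv => if kv.2 > best.2 then kv else best) h

-- the final 'for name in [...]' loop with early return
def pvVoteLoop (votes : PySem.Dict String String) : List String → String
  | [] => "?"
  | n :: rest =>
      let cand := votes.getD n "?"
      if pyLABELS_4.contains cand then cand else pvVoteLoop votes rest

def vote_4 (open_ans : String) (deep_ans : String) (xai_ans : String) : String :=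
  let votes : PySem.Dict String String :=
    PySem.Dict.ofList [("OPENAI", open_ans), ("DEEPSEEK", deep_ans), ("XAI", xai_ans)]
  let letters : PySem.Dict String String :=
    PySem.Dict.ofList (votes.items.filter (fun kv => pyLABELS_4.contains kv.2))
  if letters.items.isEmpty then "?"
  else
    let counter := PySem.Dict.counter letters.values
    let best := pvMostCommon1 counter.items
    if best.2 ≥ 2 then best.1
    else pvVoteLoop votes ["OPENAI", "DEEPSEEK", "XAI"]

-- ===== PORT B =====
def vote_4_alt (open_ans : String) (deep_ans : String) (xai_ans : String) : String :=
  if pyLABELS_4.contains open_ans && (open_ans == deep_ans || open_ans == xai_ans) then open_ans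
  else if pyLABELS_4.contains deep_ans && deep_ans == xai_ans then deep_ans
  else
    match [open_ans, deep_ans, xai_ans].find? (fun c => pyLABELS_4.contains c) with
    | some c => c
    | none => "?"

-- ===== PRECONDITION & SPEC =====
def Spec_vote_4 (open_ans : String) (deep_ans : String) (xai_ans : String) (out : String) : Prop := out = vote_4_alt open_ans deep_ans xai_ans
instance (open_ans : String) (deep_ans : String) (xai_ans : String) (out : String) : Decidable (Spec_vote_4 open_ans deep_ans xai_ans out) := by unfold Spec_vote_4; infer_instance

-- ===== CLAIM (what is proved, stated in full; the proofs are below) =====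
def Claim_equal_vote_4 : Prop := ∀ (open_ans : String) (deep_ans : String) (xai_ans : String), Dom_vote_4 open_ans deep_ans xai_ans → Spec_vote_4 open_ans deep_ans xai_ans (vote_4 open_ans deep_ans xai_ans)

-- ===== LEMMAS AND PROOFS =====
lemma pv_valid_cases (s : String) :
    s = "A" ∨ s = "B" ∨ s = "C" ∨ s = "D" ∨
      ((¬ ("A" = s)) ∧ (¬ ("B" = s)) ∧ (¬ ("C" = s)) ∧ (¬ ("D" = s)) ∧
        pyLABELS_4.contains s = false) := by
  by_cases h : pyLABELS_4.contains s = true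
  · simp [pyLABELS_4] at h
    rcases h with h | h | h | h <;> simp [h]
  · right; right; right; right
    simp [pyLABELS_4] at h
    obtain ⟨h1, h2, h3, h4⟩ := h
    refine ⟨fun e => h1 e.symm, fun e => h2 e.symm, fun e => h3 e.symm, fun e => h4 e.symm, ?_⟩
    simp [pyLABELS_4, h1, h2, h3, h4]

lemma pv_items3 (o d x : String) :
    (PySem.Dict.ofList [("OPENAI", o), ("DEEPSEEK", d), ("XAI", x)]).items
      = [("OPENAI", o), ("DEEPSEEK", d), ("XAI", x)] := rfl
lemma pv_getD_open (o d x : String) :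
    (PySem.Dict.ofList [("OPENAI", o), ("DEEPSEEK", d), ("XAI", x)]).getD "OPENAI" "?" = o := rfl
lemma pv_getD_deep (o d x : String) :
    (PySem.Dict.ofList [("OPENAI", o), ("DEEPSEEK", d), ("XAI", x)]).getD "DEEPSEEK" "?" = d := rfl
lemma pv_getD_xai (o d x : String) :
    (PySem.Dict.ofList [("OPENAI", o), ("DEEPSEEK", d), ("XAI", x)]).getD "XAI" "?" = x := rfl

-- ===== VERDICT (by name: the statement is the Claim_ definition above) =====
set_option maxHeartbeats 4000000 in
set_option maxRecDepth 4096 in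
theorem vote_4_spec : Claim_equal_vote_4 := by
  intro o d x _
  unfold Spec_vote_4
  rcases pv_valid_cases o with ho | ho | ho | ho | ⟨ho1, ho2, ho3, ho4, ho⟩ <;>
  rcases pv_valid_cases d with hd | hd | hd | hd | ⟨hd1, hd2, hd3, hd4, hd⟩ <;>
  rcases pv_valid_cases x with hx | hx | hx | hx | ⟨hx1, hx2, hx3, hx4, hx⟩ <;>
    subst_vars <;>
    simp only [vote_4, vote_4_alt, pvVoteLoop, pv_items3, pv_getD_open, pv_getD_deep,
      pv_getD_xai, List.filter_cons, List.filter_nil, *] <;>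
    (try simp_all [pyLABELS_4]) <;> decide
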